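-- pv_equiv track=rewrite | github.com/squidistaken/imperative-programming | Block 2/Week 3/anagrams.py | compare_letters
-- ===== SOURCE A (Python) =====
-- def compare_letters(_word: list[str]) -> bool:
--     # If there is less than one or one character left in the word, this is a palindrome
--     if len(_word) <= 1:
--         return True
--     # Check if the first character is in remaining word.
--     if _word[0] in _word[1:]:
--         x = _word[1:]
--         # We remove all mentions of _word[0] in the "new word"
--         x.remove(_word[0])
--         return compare_letters(x)
--     else:
--         compare_letters(_word[1:])
--     # Word is not a palindrome
--     return False
-- ===== SOURCE B (Python) =====
-- def compare_letters(_word: list[str]) -> bool: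
--     # A word's letters can be rearranged into a palindrome exactly when
--     # at most one letter occurs an odd number of times.
--     counts = {}
--     for c in _word:
--         counts[c] = counts.get(c, 0) + 1
--     odd = sum(1 for v in counts.values() if v % 2 == 1)
--     return odd <= 1
-- ===== Notes on version B (the rewrite author's own statement) =====
-- stated objective: faster
-- what changed: Replaces A's O(n^2) recursive greedy simulation (slice + membership scan + remove per step) with the standard O(n) palindrome-permutation check: count every value once and accept iff at most one value has an odd count.
-- intended difference: On inputs where exactly one value x has an odd count and the segment after x's last occurrence contains a duplicate (e.g. ['a','b','b']), A returns False although the letters do admit a palindrome arrangement; B returns True, the intended answer for this palindrome-anagram check. — e.g. on compare_letters(["a", "b", "b"]): A returns false, B returns true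
import Mathlib
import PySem

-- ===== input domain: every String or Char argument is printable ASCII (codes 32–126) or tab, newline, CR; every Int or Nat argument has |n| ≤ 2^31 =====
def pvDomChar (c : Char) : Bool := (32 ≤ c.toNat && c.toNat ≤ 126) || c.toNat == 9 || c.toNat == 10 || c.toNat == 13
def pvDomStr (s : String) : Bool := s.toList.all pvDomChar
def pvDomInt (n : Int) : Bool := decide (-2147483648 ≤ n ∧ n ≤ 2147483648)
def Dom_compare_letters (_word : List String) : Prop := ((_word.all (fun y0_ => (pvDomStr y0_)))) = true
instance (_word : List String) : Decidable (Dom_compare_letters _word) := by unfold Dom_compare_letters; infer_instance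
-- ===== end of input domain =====

-- B replaces A's quadratic recursive greedy simulation by the linear standard
-- palindrome-permutation check (at most one odd count); on the D_ inputs below
-- A returns False where B returns the intended True.

-- ===== PORT A =====
-- helper cited by the port's termination proof
lemma pvRemoveLen {xs : List String} {v : String} (h : v ∈ xs) :
    ((PySem.List.remove? xs v).getD xs).length < xs.length + 1 := by
  rw [PySem.List.remove?_eq_some_erase xs v h]
  have h1 := List.length_erase_of_mem h
  have h2 : 0 < xs.length := List.length_pos_of_mem h
  simp only [Option.getD_some]
  omega

-- literal transliteration of A: recursive greedy front-pairing with membership scan and remove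
def compare_letters (_word : List String) : Bool :=
  if _word.length ≤ 1 then true
  else
    match _word with
    | [] => true
    | c :: rest =>
      if h : rest.contains c then
        -- x = _word[1:]; x.remove(_word[0]); return compare_letters(x)
        -- (c ∈ rest holds here, so remove? is some; getD is only a totality guard)
        compare_letters ((PySem.List.remove? rest c).getD rest)
      else
        -- A makes this call and discards its result
        let _ := compare_letters rest
        false
termination_by _word.length
decreasing_by
  · have hm : c ∈ rest := by simpa using h
    have := pvRemoveLen (xs := rest) (v := c) hm
    simp only [List.length_cons]
    omega
  · simp only [List.length_cons]
    omega

-- ===== PORT B =====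
-- literal transliteration of B (Source B): one counting pass, then count the odd values
def compare_letters_alt (_word : List String) : Bool :=
  let counts := _word.foldl (fun d c => d.insert c (d.getD c 0 + 1))
    (PySem.Dict.empty : PySem.Dict String Int)
  let odd : Int := ((counts.values.filter (fun v => PySem.Int.mod v 2 == 1)).length : Int)
  decide (odd ≤ 1)

-- ===== PRECONDITION & SPEC =====
-- input-inspection helpers for D_ (no port code): the distinct values with odd
-- count, and the segment of the word after the last occurrence of x
def pvOddList (l : List String) : List String :=
  (PySem.Set.ofList l).filter (fun c => decide (l.count c % 2 = 1))
def pvAfter (x : String) (l : List String) : List String :=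
  l.reverse.takeWhile (fun c => !(c == x))

-- On inputs where exactly one value x has an odd count and the segment after x's
-- last occurrence contains a duplicate, A returns False although the letters admit
-- a palindrome arrangement; B returns True, the intended answer.
def D_compare_letters (_word : List String) : Prop :=
  (pvOddList _word).length = 1 ∧ ∃ x ∈ pvOddList _word, ¬ (pvAfter x _word).Nodup
instance (_word : List String) : Decidable (D_compare_letters _word) := by
  unfold D_compare_letters; infer_instance

def Spec_compare_letters (_word : List String) (out : Bool) : Prop :=
  ¬ D_compare_letters _word → out = compare_letters_alt _word
instance (_word : List String) (out : Bool) : Decidable (Spec_compare_letters _word out) := by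
  unfold Spec_compare_letters; infer_instance

def pvDiffWitness_compare_letters : List String := ["a", "b", "b"]
def pvDiffWitnessOut_compare_letters : Bool × Bool := (false, true)

-- ===== CLAIM (what is proved, stated in full; the proofs are below) =====
def Claim_unchanged_compare_letters : Prop :=
  ∀ (_word : List String), Dom_compare_letters _word → Spec_compare_letters _word (compare_letters _word)
def Claim_changed_compare_letters : Prop :=
  Dom_compare_letters (pvDiffWitness_compare_letters) ∧ D_compare_letters (pvDiffWitness_compare_letters) ∧ compare_letters (pvDiffWitness_compare_letters) = pvDiffWitnessOut_compare_letters.1 ∧ compare_letters_alt (pvDiffWitness_compare_letters) = pvDiffWitnessOut_compare_letters.2 ∧ pvDiffWitnessOut_compare_letters.1 ≠ pvDiffWitnessOut_compare_letters.2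
def Claim_exact_compare_letters : Prop :=
  ∀ (_word : List String), Dom_compare_letters _word → D_compare_letters _word → compare_letters _word ≠ compare_letters_alt _word

-- ===== LEMMAS AND PROOFS =====

-- the odd-count values as A's proof sees them (via the counter dict)
def pvOddsD (l : List String) : List String :=
  (PySem.Dict.counter l).keys.filter (fun c => PySem.Int.mod ((PySem.Dict.counter l).getD c 0) 2 == 1)

-- proof-side characterization of A's value (proved equal to A in pvAB below):
-- the for-loop over reversed(_word) breaking at the first x
def pvTail (x : String) : List String → List String
  | [] => []
  | c :: r => if c == x then [] else c :: pvTail x r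

def pvChar (l : List String) : Bool :=
  let odd := pvOddsD l
  if odd.length = 0 then true
  else if 1 < odd.length then false
  else
    match odd with
    | [] => true
    | x :: _ => (PySem.Set.len (PySem.Set.ofList (pvTail x l.reverse)) == PySem.List.len (pvTail x l.reverse))

lemma pvMem_odds (l : List String) (c : String) :
    c ∈ pvOddsD l ↔ c ∈ l ∧ List.count c l % 2 = 1 := by
  unfold pvOddsD
  rw [List.mem_filter, PySem.Dict.keys_counter, PySem.Set.mem_ofList,
    PySem.Dict.getD_counter, PySem.Int.mod_eq_emod_of_pos (by norm_num : (0:Int) < 2)]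
  rw [beq_iff_eq]
  constructor
  · rintro ⟨h1, h2⟩
    exact ⟨h1, by omega⟩
  · rintro ⟨h1, h2⟩
    exact ⟨h1, by omega⟩

lemma pvNodup_odds (l : List String) : (pvOddsD l).Nodup := by
  unfold pvOddsD
  rw [PySem.Dict.keys_counter]
  exact (PySem.Set.nodup_ofList l).filter _

lemma pvOfList_sublist (t : List String) : (PySem.Set.ofList t).Sublist t := by
  induction t using List.reverseRecOn with
  | nil => simp [PySem.Set.ofList]
  | append_singleton t a ih =>
    rw [PySem.Set.ofList_eq_foldl, List.foldl_append, ← PySem.Set.ofList_eq_foldl]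
    simp only [List.foldl_cons, List.foldl_nil]
    unfold PySem.Set.add
    split
    · exact ih.trans (List.sublist_append_left t [a])
    · exact List.Sublist.append ih (List.Sublist.refl [a])

lemma pvOfList_of_nodup (t : List String) (h : t.Nodup) : PySem.Set.ofList t = t := by
  induction t using List.reverseRecOn with
  | nil => simp [PySem.Set.ofList]
  | append_singleton t a ih =>
    have hn : t.Nodup := h.sublist (List.sublist_append_left t [a])
    have ha : a ∉ t := by
      rw [← List.count_eq_zero]
      have h1 := List.nodup_iff_count_le_one.mp h a
      rw [List.count_append, List.count_singleton] at h1
      simp at h1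
      omega
    rw [PySem.Set.ofList_eq_foldl, List.foldl_append, ← PySem.Set.ofList_eq_foldl]
    simp only [List.foldl_cons, List.foldl_nil]
    rw [ih hn]
    unfold PySem.Set.add
    have hcf : ¬ PySem.Set.contains t a = true := by
      simp [PySem.Set.contains]
      exact ha
    rw [if_neg hcf]

lemma pvSetLen (t : List String) :
    (PySem.Set.len (PySem.Set.ofList t) == PySem.List.len t) = decide t.Nodup := by
  by_cases h : t.Nodup
  · rw [pvOfList_of_nodup t h]
    simp [PySem.Set.len, PySem.List.len_eq, h]
  · have hne : (PySem.Set.ofList t).length ≠ t.length := fun he =>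
      h ((pvOfList_sublist t).eq_of_length he ▸ PySem.Set.nodup_ofList t)
    simp only [PySem.Set.len, PySem.List.len_eq, h, decide_false]
    rw [beq_eq_false_iff_ne]
    exact fun he => hne (Nat.cast_inj.mp he)

-- the three value lemmas for pvChar
lemma pvC0 (l : List String) (h : ∀ c ∈ l, List.count c l % 2 = 0) :
    pvChar l = true := by
  have hnil : pvOddsD l = [] := by
    rw [List.eq_nil_iff_forall_not_mem]
    intro c hc
    rcases (pvMem_odds l c).mp hc with ⟨h1, h2⟩
    have := h c h1
    omega
  unfold pvChar
  rw [hnil]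
  simp

lemma pvC2 (l : List String) (a b : String) (ha : a ∈ l) (hb : b ∈ l) (hab : a ≠ b)
    (h1 : List.count a l % 2 = 1) (h2 : List.count b l % 2 = 1) :
    pvChar l = false := by
  have ha' : a ∈ pvOddsD l := (pvMem_odds l a).mpr ⟨ha, h1⟩
  have hb' : b ∈ pvOddsD l := (pvMem_odds l b).mpr ⟨hb, h2⟩
  have hlen : 1 < (pvOddsD l).length := by
    match ho : pvOddsD l with
    | [] => rw [ho] at ha'; cases ha'
    | [y] =>
      rw [ho] at ha' hb'
      simp at ha' hb'
      exact absurd (ha'.trans hb'.symm) hab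
    | y :: z :: t =>
      simp only [List.length_cons]
      omega
  unfold pvChar
  rw [if_neg (by omega), if_pos hlen]

lemma pvOdds_single (l : List String) (x : String) (hx : x ∈ l)
    (hodd : List.count x l % 2 = 1)
    (huniq : ∀ c ∈ l, List.count c l % 2 = 1 → c = x) :
    pvOddsD l = [x] := by
  have hx' : x ∈ pvOddsD l := (pvMem_odds l x).mpr ⟨hx, hodd⟩
  have hall : ∀ y ∈ pvOddsD l, y = x := by
    intro y hy
    rcases (pvMem_odds l y).mp hy with ⟨h1, h2⟩
    exact huniq y h1 h2
  have hnd := pvNodup_odds l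
  match ho : pvOddsD l with
  | [] => rw [ho] at hx'; cases hx'
  | [y] =>
    rw [ho] at hall
    have := hall y (by simp)
    rw [this]
  | y :: z :: t =>
    rw [ho] at hall hnd
    have h1 : y = x := hall y (by simp)
    have h2 : z = x := hall z (by simp)
    rw [List.nodup_cons] at hnd
    exact absurd (by simp [h1, h2.symm] : y ∈ z :: t) hnd.1

lemma pvC1 (l : List String) (x : String) (hx : x ∈ l)
    (hodd : List.count x l % 2 = 1)
    (huniq : ∀ c ∈ l, List.count c l % 2 = 1 → c = x) :
    pvChar l = decide (pvTail x l.reverse).Nodup := by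
  unfold pvChar
  rw [pvOdds_single l x hx hodd huniq]
  rw [if_neg (by simp), if_neg (by simp)]
  exact pvSetLen _

-- tail machinery
lemma pvTail_append (x : String) (u v : List String) (hu : x ∉ u) :
    pvTail x (u ++ x :: v) = u := by
  induction u with
  | nil => simp [pvTail]
  | cons a t ih =>
    have hax : (a == x) = false := by
      rw [beq_eq_false_iff_ne]
      intro h
      exact hu (by simp [h])
    simp only [List.cons_append, pvTail, hax, Bool.false_eq_true, if_false, List.cons.injEq, true_and]
    exact ih (fun h => hu (List.mem_cons_of_mem _ h))

lemma pvTail_rev (x : String) (u v : List String) (hxv : x ∉ v) :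
    pvTail x ((u ++ x :: v).reverse) = v.reverse := by
  have hsh : (u ++ x :: v).reverse = v.reverse ++ x :: u.reverse := by
    simp [List.reverse_append]
  rw [hsh]
  exact pvTail_append x v.reverse u.reverse (by simpa using hxv)

lemma pvSplitLast (x : String) : ∀ (r : List String), x ∈ r → ∃ u v, r = u ++ x :: v ∧ x ∉ v := by
  intro r
  induction r with
  | nil => intro h; cases h
  | cons a t ih =>
    intro hr
    by_cases ht : x ∈ t
    · obtain ⟨u, v, h1, h2⟩ := ih ht
      exact ⟨a :: u, v, by rw [h1]; rfl, h2⟩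
    · rcases List.mem_cons.mp hr with h | h
      · exact ⟨[], t, by rw [h]; rfl, ht⟩
      · exact absurd h ht

-- pvChar's tail test is unchanged by removing the matched front pair
lemma pvTailEq (c : String) (rest : List String) (x : String) (hc : c ∈ rest)
    (hxodd : List.count x (c :: rest) % 2 = 1)
    (huniq : ∀ y ∈ (c :: rest), List.count y (c :: rest) % 2 = 1 → y = x) :
    decide (pvTail x (c :: rest).reverse).Nodup = decide (pvTail x ((rest.erase c).reverse)).Nodup := by
  have hxrest : x ∈ rest := by
    by_cases hxc : x = c
    · exact hxc ▸ hc
    · have hxmem : x ∈ c :: rest := List.count_pos_iff.mp (by omega)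
      rcases List.mem_cons.mp hxmem with h | h
      · exact absurd h hxc
      · exact h
  obtain ⟨u, v, hrv, hxv⟩ := pvSplitLast x rest hxrest
  subst hrv
  have htail1 : pvTail x (c :: (u ++ x :: v)).reverse = v.reverse := by
    rw [show (c :: (u ++ x :: v)) = (c :: u) ++ x :: v from rfl]
    exact pvTail_rev x (c :: u) v hxv
  by_cases hcu : c ∈ u
  · rw [htail1, List.erase_append_left _ hcu, pvTail_rev x (u.erase c) v hxv]
  · by_cases hcx : c = x
    · exfalso
      subst hcx
      rw [List.count_cons_self, List.count_append, List.count_eq_zero.mpr hcu,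
        List.count_cons_self, List.count_eq_zero.mpr hxv] at hxodd
      omega
    · have hcv : c ∈ v := by
        rcases List.mem_append.mp hc with h | h
        · exact absurd h hcu
        · rcases List.mem_cons.mp h with h | h
          · exact absurd h hcx
          · exact h
      have he : (u ++ x :: v).erase c = u ++ x :: v.erase c := by
        rw [List.erase_append_right _ hcu, List.erase_cons_tail (by simp; exact fun h => hcx h.symm)]
      have hxve : x ∉ v.erase c := fun h => hxv (List.mem_of_mem_erase h)
      rw [htail1, he, pvTail_rev x u (v.erase c) hxve]
      have hceven : List.count c (c :: (u ++ x :: v)) % 2 = 0 := by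
        by_contra hno
        exact hcx (huniq c (by simp) (by omega))
      have hcnt : List.count c (c :: (u ++ x :: v)) = 1 + List.count c v := by
        rw [List.count_cons_self, List.count_append, List.count_eq_zero.mpr hcu,
          List.count_cons_of_ne (fun h => hcx h.symm)]
        omega
      have hcv1 : List.count c v % 2 = 1 := by omega
      rw [decide_eq_decide, List.nodup_reverse, List.nodup_reverse]
      constructor
      · exact fun hnd => hnd.erase c
      · intro hnd
        have hc1 : List.count c v = 1 := by
          have hle := List.nodup_iff_count_le_one.mp hnd c
          rw [List.count_erase_self] at hle
          have hpos : 0 < List.count c v := List.count_pos_iff.mpr hcv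
          omega
        obtain ⟨v₁, v₂, hnv1, hveq, herase⟩ := List.exists_erase_eq hcv
        rw [herase] at hnd
        rw [hveq, List.nodup_middle, List.nodup_cons]
        refine ⟨?_, hnd⟩
        intro hmem
        have hpos : 0 < List.count c (v₁ ++ v₂) := List.count_pos_iff.mpr hmem
        rw [hveq, List.count_append, List.count_cons_self] at hc1
        rw [List.count_append] at hpos
        omega

-- the main step lemma: removing the matched front pair preserves pvChar's verdict
lemma pvM2 (c : String) (rest : List String) (hc : c ∈ rest) :
    pvChar (c :: rest) = pvChar (rest.erase c) := by
  have hcr : 0 < List.count c rest := List.count_pos_iff.mpr hc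
  have hpar : ∀ y, List.count y (c :: rest) % 2 = List.count y (rest.erase c) % 2 := by
    intro y
    by_cases hy : y = c
    · subst hy
      rw [List.count_cons_self, List.count_erase_self]
      omega
    · rw [List.count_cons_of_ne (fun h => hy h.symm), List.count_erase_of_ne hy]
  have hmem : ∀ y, List.count y (c :: rest) % 2 = 1 → y ∈ rest.erase c := by
    intro y hy
    have h1 := hpar y
    exact List.count_pos_iff.mp (by omega)
  have hmem' : ∀ y, y ∈ rest.erase c → y ∈ c :: rest :=
    fun y hy => List.mem_cons_of_mem _ (List.mem_of_mem_erase hy)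
  by_cases hall : ∀ y ∈ (c :: rest), List.count y (c :: rest) % 2 = 0
  · rw [pvC0 _ hall, pvC0]
    intro y hy
    have h1 := hpar y
    have h2 := hall y (hmem' y hy)
    omega
  · push Not at hall
    obtain ⟨z, hzmem, hzodd'⟩ := hall
    have hzodd : List.count z (c :: rest) % 2 = 1 := by omega
    by_cases huniq : ∀ y ∈ (c :: rest), List.count y (c :: rest) % 2 = 1 → y = z
    · rw [pvC1 _ z hzmem hzodd huniq,
        pvC1 (rest.erase c) z (hmem z hzodd) (by rw [← hpar z]; exact hzodd)
          (fun y hy hyo => huniq y (hmem' y hy) (by rw [hpar y]; exact hyo))]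
      exact pvTailEq c rest z hc hzodd huniq
    · push Not at huniq
      obtain ⟨y, hymem, hyodd, hyz⟩ := huniq
      rw [pvC2 _ z y hzmem hymem (fun h => hyz h.symm) hzodd hyodd,
        pvC2 (rest.erase c) z y (hmem z hzodd) (hmem y hyodd) (fun h => hyz h.symm)
          (by rw [← hpar z]; exact hzodd) (by rw [← hpar y]; exact hyodd)]

lemma pvM3 (c : String) (rest : List String) (hc : c ∉ rest) (hne : rest ≠ []) :
    pvChar (c :: rest) = false := by
  have hcc : List.count c (c :: rest) = 1 := by
    rw [List.count_cons_self, List.count_eq_zero.mpr hc]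
  by_cases hex : ∃ y ∈ rest, y ≠ c ∧ List.count y (c :: rest) % 2 = 1
  · obtain ⟨y, hy, hyc, hyo⟩ := hex
    exact pvC2 _ c y (by simp) (List.mem_cons_of_mem _ hy) (fun h => hyc h.symm) (by omega) hyo
  · push Not at hex
    rw [pvC1 _ c (by simp) (by omega) ?uniq]
    case uniq =>
      intro y hy hyo
      rcases List.mem_cons.mp hy with h | h
      · exact h
      · by_contra hyc
        exact hex y h hyc hyo
    have htl : pvTail c (c :: rest).reverse = rest.reverse := by
      rw [show ((c :: rest) : List String) = [] ++ c :: rest from rfl]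
      exact pvTail_rev c [] rest hc
    rw [htl, decide_eq_false_iff_not, List.nodup_reverse]
    cases rest with
    | nil => exact absurd rfl hne
    | cons y t =>
      have hyc : y ≠ c := fun h => hc (h ▸ List.mem_cons_self ..)
      have heven : ¬ List.count y (c :: y :: t) % 2 = 1 := hex y (List.mem_cons_self ..) hyc
      have h1 : 0 < List.count y (y :: t) := List.count_pos_iff.mpr (List.mem_cons_self ..)
      have h2 : List.count y (c :: y :: t) = List.count y (y :: t) :=
        List.count_cons_of_ne (fun h => hyc h.symm)
      intro hnd
      have h3 := List.nodup_iff_count_le_one.mp hnd y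
      omega

-- A's unfolding lemmas
lemma pvA_nil : compare_letters [] = true := by
  rw [compare_letters]
  simp

lemma pvA_single (s : String) : compare_letters [s] = true := by
  rw [compare_letters]
  simp

lemma pvA_mem (c : String) (rest : List String) (hne : rest ≠ []) (h : c ∈ rest) :
    compare_letters (c :: rest) = compare_letters (rest.erase c) := by
  rw [compare_letters]
  have hlen : ¬ (c :: rest).length ≤ 1 := by
    cases rest with
    | nil => exact absurd rfl hne
    | cons a t => simp [List.length_cons]
  rw [if_neg hlen]
  have hcont : rest.contains c = true := List.contains_iff_mem.mpr h
  simp only [hcont, dite_true]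
  rw [PySem.List.remove?_eq_some_erase rest c h]
  rfl

lemma pvA_not_mem (c : String) (rest : List String) (hne : rest ≠ []) (h : c ∉ rest) :
    compare_letters (c :: rest) = false := by
  rw [compare_letters]
  have hlen : ¬ (c :: rest).length ≤ 1 := by
    cases rest with
    | nil => exact absurd rfl hne
    | cons a t => simp [List.length_cons]
  rw [if_neg hlen]
  have hcont : rest.contains c = false := by
    rw [← Bool.not_eq_true]
    exact fun hx => h (List.contains_iff_mem.mp hx)
  simp only [hcont, Bool.false_eq_true, dite_false]

lemma pvB_single (s : String) : pvChar [s] = true := by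
  rw [pvC1 [s] s (by simp) (by simp) (fun c hc _ => by simpa using hc)]
  simp [pvTail]

lemma pvAB : ∀ (n : Nat) (l : List String), l.length ≤ n →
    compare_letters l = pvChar l := by
  intro n
  induction n with
  | zero =>
    intro l h
    have hl : l = [] := List.eq_nil_of_length_eq_zero (by omega)
    subst hl
    rw [pvA_nil]
    decide
  | succ n ih =>
    intro l h
    rcases l with _ | ⟨c, rest⟩
    · rw [pvA_nil]
      decide
    · rcases rest with _ | ⟨r0, rs⟩
      · rw [pvA_single, pvB_single]
      · by_cases hc : c ∈ r0 :: rs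
        · rw [pvA_mem c (r0 :: rs) (by simp) hc, pvM2 c (r0 :: rs) hc]
          apply ih
          have hl := List.length_erase_of_mem hc
          simp only [List.length_cons] at h hl ⊢
          omega
        · rw [pvA_not_mem c (r0 :: rs) (by simp) hc, pvM3 c (r0 :: rs) hc (by simp)]

-- BRIDGE: both the proof-side odd list and B's value reduce to pvOddList
lemma pvOddsD_eq (l : List String) : pvOddsD l = pvOddList l := by
  unfold pvOddsD pvOddList
  rw [PySem.Dict.keys_counter]
  apply List.filter_congr
  intro c hc
  rw [PySem.Dict.getD_counter, Bool.eq_iff_iff]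
  simp only [beq_iff_eq, decide_eq_true_eq,
    PySem.Int.mod_eq_emod_of_pos (by norm_num : (0:Int) < 2)]
  omega

lemma pvBalt_eq (l : List String) :
    compare_letters_alt l = decide ((pvOddList l).length ≤ 1) := by
  have h0 : compare_letters_alt l =
      decide (((((PySem.Dict.counter l).values.filter
        (fun v => PySem.Int.mod v 2 == 1)).length : Int)) ≤ 1) := rfl
  rw [h0]
  have hv : (PySem.Dict.counter l).values
      = (PySem.Set.ofList l).map (fun k => (l.count k : Int)) := by
    show ((PySem.Dict.counter l).items).map (·.2) = _
    rw [PySem.Dict.items_counter, List.map_map]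
    rfl
  rw [hv, List.filter_map, List.length_map]
  have hf : List.filter ((fun v => PySem.Int.mod v 2 == 1) ∘ fun k => (l.count k : Int))
      (PySem.Set.ofList l) = pvOddList l := by
    unfold pvOddList
    apply List.filter_congr
    intro c hc
    rw [Bool.eq_iff_iff]
    simp only [Function.comp, beq_iff_eq, decide_eq_true_eq,
      PySem.Int.mod_eq_emod_of_pos (by norm_num : (0:Int) < 2)]
    omega
  rw [hf]
  simp only [decide_eq_decide]
  omega

lemma pvTail_eq_takeWhile (x : String) : ∀ (r : List String),
    pvTail x r = r.takeWhile (fun c => !(c == x)) := by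
  intro r
  induction r with
  | nil => rfl
  | cons a t ih =>
    by_cases h : a = x
    · simp [pvTail, List.takeWhile, h]
    · have hb : (a == x) = false := beq_eq_false_iff_ne.mpr h
      simp [pvTail, List.takeWhile, hb, ih]

lemma pvChar_one (l : List String) (x : String) (hx : pvOddList l = [x]) :
    pvChar l = decide (pvAfter x l).Nodup := by
  have hx' : x ∈ pvOddsD l := by rw [pvOddsD_eq, hx]; simp
  rcases (pvMem_odds l x).mp hx' with ⟨hm, ho⟩
  have huniq : ∀ c ∈ l, List.count c l % 2 = 1 → c = x := by
    intro c hc hoc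
    have : c ∈ pvOddsD l := (pvMem_odds l c).mpr ⟨hc, hoc⟩
    rw [pvOddsD_eq, hx] at this
    simpa using this
  rw [pvC1 l x hm ho huniq, pvTail_eq_takeWhile]
  rfl

-- ===== VERDICT (by name: the statement is the Claim_ definition above) =====
theorem compare_letters_spec : Claim_unchanged_compare_letters := by
  intro l _
  intro hnd
  rw [pvAB l.length l (le_refl _), pvBalt_eq]
  match ho : pvOddList l with
  | [] =>
    have h0 : pvOddsD l = [] := by rw [pvOddsD_eq, ho]
    unfold pvChar
    rw [h0]
    simp
  | [x] =>
    have hnodup : (pvAfter x l).Nodup := by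
      by_contra hdup
      exact hnd ⟨by rw [ho]; rfl, x, by rw [ho]; simp, hdup⟩
    rw [pvChar_one l x ho]
    simp [hnodup]
  | x :: y :: t =>
    have hlen2 : 1 < (pvOddsD l).length := by
      rw [pvOddsD_eq, ho]; simp [List.length_cons]
    unfold pvChar
    rw [if_neg (by omega), if_pos hlen2]
    have : ¬ ((x :: y :: t).length ≤ 1) := by simp [List.length_cons]
    rw [decide_eq_false this]

theorem compare_letters_changed : Claim_changed_compare_letters := by
  unfold Claim_changed_compare_letters
  refine ⟨by decide, by decide, ?_, by decide, by decide⟩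
  show compare_letters ["a", "b", "b"] = false
  rw [pvA_not_mem "a" ["b", "b"] (by simp) (by decide)]

theorem compare_letters_tight : Claim_exact_compare_letters := by
  intro l _ hd
  obtain ⟨hlen, x, hx, hdup⟩ := hd
  have hx1 : pvOddList l = [x] := by
    match ho : pvOddList l with
    | [] => rw [ho] at hx; cases hx
    | [y] =>
      rw [ho] at hx
      simp at hx
      rw [hx]
    | y :: z :: t => rw [ho] at hlen; simp [List.length_cons] at hlen
  rw [pvAB l.length l (le_refl _), pvBalt_eq, pvChar_one l x hx1, hx1]
  simp [hdup]
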